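-- pv_equiv track=rewrite | github.com/jordanaron22/Weighted-Voting-Comps-Winter-Spring-2018 | Ambiguities.py | check_complement
-- ===== SOURCE A (Python) =====
-- def check_complement(list_of_winning_coals):
--     inds_remove = []
--     for collection in range(len(list_of_winning_coals)):
--         for index1 in range(len(list_of_winning_coals[collection])):
--             for index2 in range (index1, len(list_of_winning_coals[collection])):
--                 c1 = set(list_of_winning_coals[collection][index1])
--                 c2 = set(list_of_winning_coals[collection][index2])
--                 if len(c1 & c2) == 0:
--                     if collection not in inds_remove:
--                         inds_remove.append(collection)
--
--     inds_remove.sort(reverse=True)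
--     for entry in inds_remove:
--         del list_of_winning_coals[entry]
--
--
--     return list_of_winning_coals
-- ===== SOURCE B (Python) =====
-- def check_complement(list_of_winning_coals):
--     # A collection must be removed iff it contains an ordered pair (i <= j) of
--     # coalitions whose sets are disjoint.  Instead of scanning all pairs, build an
--     # inverted index element -> set of coalition indices containing it; then
--     # coalition i has a disjoint partner iff the union of the index-sets of its
--     # elements does not cover all coalitions (an empty coalition covers nothing,
--     # so it is caught too, matching the i == j case of the pair scan).
--     def has_disjoint(collection):
--         owners = {}
--         for idx, coal in enumerate(collection):
--             for x in coal:
--                 owners[x] = owners.get(x, set()) | {idx}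
--         k = len(collection)
--         for coal in collection:
--             mates = set()
--             for x in coal:
--                 mates = mates | owners.get(x, set())
--             if len(mates) != k:
--                 return True
--         return False
--
--     list_of_winning_coals[:] = [c for c in list_of_winning_coals
--                                 if not has_disjoint(c)]
--     return list_of_winning_coals
-- ===== Notes on version B (the rewrite author's own statement) =====
-- stated objective: alternative
-- what changed: Replaces A's all-pairs intersection scan with per-pair set rebuilding plus the mark-indices/sort-descending/delete pipeline by an inverted index (element -> set of coalition indices): a collection is dropped iff some coalition's union of owner index-sets fails to cover all coalition indices, and survivors are kept by one slice-assigned filter.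
import Mathlib
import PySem

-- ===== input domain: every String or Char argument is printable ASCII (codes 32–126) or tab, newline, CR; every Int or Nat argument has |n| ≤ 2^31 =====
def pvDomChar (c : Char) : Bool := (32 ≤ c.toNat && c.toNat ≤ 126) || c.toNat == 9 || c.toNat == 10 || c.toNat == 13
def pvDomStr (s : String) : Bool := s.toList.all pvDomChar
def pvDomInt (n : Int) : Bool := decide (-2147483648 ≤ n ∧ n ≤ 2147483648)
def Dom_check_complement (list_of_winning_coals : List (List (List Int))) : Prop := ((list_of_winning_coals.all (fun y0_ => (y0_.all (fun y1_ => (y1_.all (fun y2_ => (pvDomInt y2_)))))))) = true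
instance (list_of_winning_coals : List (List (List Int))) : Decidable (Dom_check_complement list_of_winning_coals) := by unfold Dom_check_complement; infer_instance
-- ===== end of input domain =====

-- B replaces A's pair scan (set(c1)&set(c2) for every ordered pair) and its
-- mark-indices / sort-descending / delete pipeline by an inverted index
-- element -> set of coalition indices, keeping survivors with one filter;
-- equivalence is about the RETURN value (both Pythons mutate the argument in
-- place to the same final contents).
-- ===== PORT A =====
def check_complement (list_of_winning_coals : List (List (List Int))) : List (List (List Int)) :=
  -- for collection in range(len(...)): for index1 in ...: for index2 in range(index1, ...): mark
  let inds_remove : List Nat :=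
    (List.range list_of_winning_coals.length).foldl (fun acc collection =>
      (List.range (list_of_winning_coals.getD collection []).length).foldl (fun acc index1 =>
        (List.range' index1 ((list_of_winning_coals.getD collection []).length - index1)).foldl (fun acc index2 =>
          let c1 := PySem.Set.ofList ((list_of_winning_coals.getD collection []).getD index1 [])
          let c2 := PySem.Set.ofList ((list_of_winning_coals.getD collection []).getD index2 [])
          if (PySem.Set.inter c1 c2).length = 0 then
            (if collection ∈ acc then acc else acc ++ [collection])
          else acc) acc) acc) []
  -- inds_remove.sort(reverse=True); then del at each index (always in range here, so eraseIdx is exact)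
  let sorted_inds := PySem.List.sorted inds_remove (fun x => x) true
  sorted_inds.foldl (fun l entry => l.eraseIdx entry) list_of_winning_coals

-- ===== PORT B =====
-- inverted index: owners[x] = set of indices of the coalitions containing x
def pvOwners (collection : List (List Int)) : PySem.Dict Int (PySem.Set Int) :=
  (PySem.List.enumerate collection).foldl (fun d p =>
    p.2.foldl (fun d x =>
      d.insert x (PySem.Set.union (d.getD x PySem.Set.empty) (PySem.Set.ofList [p.1]))) d)
    PySem.Dict.empty

-- Source B's has_disjoint: some coalition's union of owner index-sets misses some index
def hasDisjoint (collection : List (List Int)) : Bool :=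
  let owners := pvOwners collection
  let k := collection.length
  collection.any (fun coal =>
    decide ((coal.foldl (fun m x => PySem.Set.union m (owners.getD x PySem.Set.empty))
      PySem.Set.empty).length ≠ k))

def check_complement_alt (list_of_winning_coals : List (List (List Int))) : List (List (List Int)) :=
  list_of_winning_coals.filter (fun c => !hasDisjoint c)

-- ===== PRECONDITION & SPEC =====
def Spec_check_complement (list_of_winning_coals : List (List (List Int))) (out : List (List (List Int))) : Prop := out = check_complement_alt list_of_winning_coals
instance (list_of_winning_coals : List (List (List Int))) (out : List (List (List Int))) : Decidable (Spec_check_complement list_of_winning_coals out) := by unfold Spec_check_complement; infer_instance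

-- ===== CLAIM (what is proved, stated in full; the proofs are below) =====
def Claim_equal_check_complement : Prop := ∀ (list_of_winning_coals : List (List (List Int))), Dom_check_complement list_of_winning_coals → Spec_check_complement list_of_winning_coals (check_complement list_of_winning_coals)

-- ===== LEMMAS AND PROOFS =====

-- A's inner triple-loop condition, as a boolean scan (proof-only helper)
def pvAScan (c : List (List Int)) : Bool :=
  (List.range c.length).any (fun i =>
    (List.range' i (c.length - i)).any (fun j =>
      (PySem.Set.inter (PySem.Set.ofList (c.getD i []))
        (PySem.Set.ofList (c.getD j []))).length = 0))

-- the two coalitions are disjoint (as sets of their elements)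
def pvDisj (a b : List Int) : Prop := ∀ x ∈ a, x ∉ b

theorem pvInterLenZero (a b : List Int) :
    (PySem.Set.inter (PySem.Set.ofList a) (PySem.Set.ofList b)).length = 0 ↔ pvDisj a b := by
  rw [List.length_eq_zero_iff, List.eq_nil_iff_forall_not_mem]
  unfold pvDisj
  constructor
  · intro h x hxa hxb
    exact h x (by rw [PySem.Set.mem_inter]; exact ⟨(PySem.Set.mem_ofList _ _).2 hxa, (PySem.Set.mem_ofList _ _).2 hxb⟩)
  · intro h x hx
    rw [PySem.Set.mem_inter, PySem.Set.mem_ofList, PySem.Set.mem_ofList] at hx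
    exact h x hx.1 hx.2

theorem pvDisj_symm (a b : List Int) : pvDisj a b ↔ pvDisj b a := by
  unfold pvDisj
  constructor <;> intro h x hx hy <;> exact h x hy hx

-- a guarded-append loop marks `col` exactly once iff some element satisfies P
theorem pvFoldlMark {β : Type} (P : β → Prop) [DecidablePred P] (col : Nat) (L : List β)
    (acc : List Nat) :
    L.foldl (fun a x => if P x then (if col ∈ a then a else a ++ [col]) else a) acc
      = if (∃ x ∈ L, P x) ∧ col ∉ acc then acc ++ [col] else acc := by
  induction L generalizing acc with
  | nil => simp
  | cons y L ih =>
    simp only [List.foldl_cons, ih]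
    by_cases hy : P y
    · by_cases hc : col ∈ acc
      · simp [hy, hc]
      · simp [hy, hc]
    · by_cases hc : col ∈ acc
      · simp [hy, hc]
      · simp [hy, hc]

theorem pvIfMark (A : Prop) [Decidable A] (col : Nat) (acc : List Nat) :
    (if A ∧ col ∉ acc then acc ++ [col] else acc)
      = if A then (if col ∈ acc then acc else acc ++ [col]) else acc := by
  by_cases hA : A <;> by_cases hc : col ∈ acc <;> simp [hA, hc]

-- the outer marking loop over fresh nodup indices appends exactly the filtered indices
theorem pvMarkFoldl (B : Nat → Prop) [DecidablePred B] (L : List Nat) (acc : List Nat)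
    (hfresh : ∀ x ∈ L, x ∉ acc) (hnd : L.Nodup) :
    L.foldl (fun a col => if B col ∧ col ∉ a then a ++ [col] else a) acc
      = acc ++ L.filter (fun c => decide (B c)) := by
  induction L generalizing acc with
  | nil => simp
  | cons x L ih =>
    simp only [List.foldl_cons, List.filter_cons]
    have hx : x ∉ acc := hfresh x (by simp)
    by_cases hB : B x
    · simp only [hB, hx, not_false_iff, and_self, if_pos, decide_eq_true_eq]
      rw [ih (acc ++ [x])]
      · simp
      · intro y hy
        simp only [List.mem_append, List.mem_singleton]
        rintro (h | rfl)
        · exact hfresh y (by simp [hy]) h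
        · exact (List.nodup_cons.mp hnd).1 hy
      · exact (List.nodup_cons.mp hnd).2
    · simp only [hB, false_and, if_neg, not_false_iff, decide_eq_true_eq]
      exact ih acc (fun y hy => hfresh y (by simp [hy])) (List.nodup_cons.mp hnd).2

-- erasing pairwise-decreasing in-range indices commutes with a trailing element
theorem pvEraseAppend {α : Type} (L : List Nat) (ys : List α) (a : α)
    (hd : L.Pairwise (· > ·)) (hlt : ∀ i ∈ L, i < ys.length) :
    L.foldl (fun l i => l.eraseIdx i) (ys ++ [a])
      = L.foldl (fun l i => l.eraseIdx i) ys ++ [a] := by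
  induction L generalizing ys with
  | nil => simp
  | cons i L ih =>
    have hi : i < ys.length := hlt i (by simp)
    simp only [List.foldl_cons]
    rw [List.eraseIdx_append_of_lt_length hi]
    apply ih
    · exact (List.pairwise_cons.mp hd).2
    · intro j hj
      have hji : j < i := (List.pairwise_cons.mp hd).1 j hj
      rw [List.length_eraseIdx_of_lt hi]
      omega

-- deleting the p-marked indices back-to-front IS filtering by !p
theorem pvDelFilter {α : Type} (p : α → Bool) (d : α) (xs : List α) :
    (((List.range xs.length).filter (fun i => p (xs.getD i d))).reverse).foldl
        (fun l i => l.eraseIdx i) xs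
      = xs.filter (fun x => !p x) := by
  induction xs using List.reverseRecOn with
  | nil => simp
  | append_singleton ys a ih =>
    have hlen : (ys ++ [a]).length = ys.length + 1 := by simp
    rw [hlen, List.range_succ, List.filter_append]
    have hsame : (List.range ys.length).filter (fun i => p ((ys ++ [a]).getD i d))
        = (List.range ys.length).filter (fun i => p (ys.getD i d)) := by
      apply List.filter_congr
      intro i hi
      have : i < ys.length := List.mem_range.mp hi
      rw [List.getD_append ys [a] d i this]
    rw [hsame, show List.filter (fun i => p ((ys ++ [a]).getD i d)) [ys.length]
        = if p a then [ys.length] else [] from by simp [List.filter_singleton]]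
    have hFlt : ∀ i ∈ (List.range ys.length).filter (fun i => p (ys.getD i d)), i < ys.length := by
      intro i hi
      exact List.mem_range.mp (List.mem_of_mem_filter hi)
    have hFpw : ((List.range ys.length).filter (fun i => p (ys.getD i d))).reverse.Pairwise (· > ·) := by
      rw [List.pairwise_reverse]
      exact List.Pairwise.filter _ (List.pairwise_lt_range)
    by_cases hp : p a
    · rw [if_pos hp, List.reverse_append]
      simp only [List.reverse_singleton, List.singleton_append, List.foldl_cons]
      have herase : (ys ++ [a]).eraseIdx ys.length = ys := by
        rw [List.eraseIdx_append_of_length_le (le_refl _)]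
        simp
      rw [herase, ih, List.filter_append]
      simp [hp]
    · rw [if_neg hp, List.append_nil]
      rw [pvEraseAppend _ _ _ hFpw (fun i hi => hFlt i (List.mem_reverse.mp hi)), ih,
        List.filter_append]
      simp [hp]

-- pvAScan as the existence of a disjoint ordered pair
theorem pvAScan_iff (c : List (List Int)) :
    pvAScan c = true ↔ ∃ i < c.length, ∃ j, i ≤ j ∧ j < c.length ∧ pvDisj (c.getD i []) (c.getD j []) := by
  unfold pvAScan
  simp only [List.any_eq_true, List.mem_range, List.mem_range'_1, decide_eq_true_eq]
  constructor
  · rintro ⟨i, hi, j, ⟨hij, hj⟩, h⟩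
    exact ⟨i, hi, j, hij, by omega, (pvInterLenZero _ _).1 h⟩
  · rintro ⟨i, hi, j, hij, hj, h⟩
    exact ⟨i, hi, j, ⟨hij, by omega⟩, (pvInterLenZero _ _).2 h⟩

-- owners invariant, inner loop: one coalition's elements with a fixed index
theorem pvOwnersInner (coal : List Int) (i : Int) (d : PySem.Dict Int (PySem.Set Int))
    (y : Int) (j : Int) :
    j ∈ (coal.foldl (fun d x =>
        d.insert x (PySem.Set.union (d.getD x PySem.Set.empty) (PySem.Set.ofList [i]))) d).getD y PySem.Set.empty
      ↔ j ∈ d.getD y PySem.Set.empty ∨ (j = i ∧ y ∈ coal) := by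
  induction coal generalizing d with
  | nil => simp
  | cons x t ih =>
    simp only [List.foldl_cons]
    rw [ih, PySem.Dict.getD_insert]
    by_cases hyx : y = x
    · rw [if_pos hyx]
      subst hyx
      rw [PySem.Set.mem_union, PySem.Set.mem_ofList]
      simp only [List.mem_cons]
      tauto
    · rw [if_neg hyx]
      simp only [List.mem_cons]
      constructor
      · rintro (h | ⟨rfl, h⟩)
        · exact Or.inl h
        · exact Or.inr ⟨rfl, Or.inr h⟩
      · rintro (h | ⟨rfl, (h | h)⟩)
        · exact Or.inl h
        · exact absurd h hyx
        · exact Or.inr ⟨rfl, h⟩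

-- owners invariant, outer loop over enumerate
theorem pvOwnersGen (c : List (List Int)) (s : Int) (d : PySem.Dict Int (PySem.Set Int))
    (y : Int) (j : Int) :
    j ∈ ((PySem.List.enumerate c s).foldl (fun d p =>
        p.2.foldl (fun d x =>
          d.insert x (PySem.Set.union (d.getD x PySem.Set.empty) (PySem.Set.ofList [p.1]))) d) d).getD y PySem.Set.empty
      ↔ j ∈ d.getD y PySem.Set.empty
          ∨ ∃ k : Nat, k < c.length ∧ j = s + k ∧ y ∈ c.getD k [] := by
  induction c generalizing s d with
  | nil => simp [PySem.List.enumerate_nil]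
  | cons coal t ih =>
    rw [PySem.List.enumerate_cons]
    simp only [List.foldl_cons, ih, pvOwnersInner]
    constructor
    · rintro ((h | ⟨rfl, h⟩) | ⟨k, hk, rfl, h⟩)
      · exact Or.inl h
      · exact Or.inr ⟨0, by simp, by simp, by simpa using h⟩
      · exact Or.inr ⟨k + 1, by simpa using hk, by push_cast; ring, by simpa using h⟩
    · rintro (h | ⟨k, hk, rfl, h⟩)
      · exact Or.inl (Or.inl h)
      · cases k with
        | zero => exact Or.inl (Or.inr ⟨by simp, by simpa using h⟩)
        | succ k =>
          refine Or.inr ⟨k, by simpa using hk, by push_cast; ring, by simpa using h⟩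

theorem pvOwners_mem (c : List (List Int)) (y : Int) (j : Int) :
    j ∈ (pvOwners c).getD y PySem.Set.empty
      ↔ ∃ k : Nat, k < c.length ∧ j = (k : Int) ∧ y ∈ c.getD k [] := by
  unfold pvOwners
  rw [pvOwnersGen]
  simp [PySem.Dict.getD_empty, PySem.Set.empty]

-- the mates accumulator: membership and nodup
theorem pvMatesMem (c : List (List Int)) (coal : List Int) (acc : PySem.Set Int) (j : Int) :
    j ∈ coal.foldl (fun m x => PySem.Set.union m ((pvOwners c).getD x PySem.Set.empty)) acc
      ↔ j ∈ acc ∨ ∃ x ∈ coal, j ∈ (pvOwners c).getD x PySem.Set.empty := by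
  induction coal generalizing acc with
  | nil => simp
  | cons x t ih =>
    simp only [List.foldl_cons, ih, PySem.Set.mem_union, List.mem_cons]
    constructor
    · rintro ((h | h) | ⟨z, hz, h⟩)
      · exact Or.inl h
      · exact Or.inr ⟨x, Or.inl rfl, h⟩
      · exact Or.inr ⟨z, Or.inr hz, h⟩
    · rintro (h | ⟨z, (rfl | hz), h⟩)
      · exact Or.inl (Or.inl h)
      · exact Or.inl (Or.inr h)
      · exact Or.inr ⟨z, hz, h⟩

theorem pvMatesNodup (c : List (List Int)) (coal : List Int) (acc : PySem.Set Int)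
    (h : acc.Nodup) :
    (coal.foldl (fun m x => PySem.Set.union m ((pvOwners c).getD x PySem.Set.empty)) acc).Nodup := by
  induction coal generalizing acc with
  | nil => exact h
  | cons x t ih =>
    simp only [List.foldl_cons]
    exact ih _ (PySem.Set.nodup_union _ _ h)

-- a nodup list whose members are exactly the casts of {k < n | P k} has length n iff P holds below n
theorem pvLenFull (m : List Int) (n : Nat) (P : Nat → Prop) [DecidablePred P]
    (hnd : m.Nodup) (hmem : ∀ j : Int, j ∈ m ↔ ∃ k : Nat, k < n ∧ j = (k : Int) ∧ P k) :
    m.length = n ↔ ∀ k < n, P k := by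
  classical
  have hset : m.toFinset = Finset.image (Nat.cast : Nat → Int) ((Finset.range n).filter P) := by
    ext j
    simp only [List.mem_toFinset, hmem, Finset.mem_image, Finset.mem_filter, Finset.mem_range]
    constructor
    · rintro ⟨k, hk, rfl, hP⟩
      exact ⟨k, ⟨hk, hP⟩, rfl⟩
    · rintro ⟨k, ⟨hk, hP⟩, rfl⟩
      exact ⟨k, hk, rfl, hP⟩
  have hcard : m.length = ((Finset.range n).filter P).card := by
    rw [← List.toFinset_card_of_nodup hnd, hset,
      Finset.card_image_of_injective _ (fun a b h => by exact_mod_cast h)]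
  rw [hcard]
  constructor
  · intro h k hk
    have hsub : (Finset.range n).filter P ⊆ Finset.range n := Finset.filter_subset _ _
    have : (Finset.range n).filter P = Finset.range n :=
      Finset.eq_of_subset_of_card_le hsub (by rw [h, Finset.card_range])
    have := this ▸ (Finset.mem_range.2 hk)
    exact (Finset.mem_filter.1 this).2
  · intro h
    rw [Finset.filter_true_of_mem (fun k hk => h k (Finset.mem_range.1 hk)), Finset.card_range]

-- hasDisjoint as the existence of a coalition with a disjoint partner
theorem pvHasDisjoint_iff (c : List (List Int)) :
    hasDisjoint c = true ↔ ∃ i < c.length, ∃ j < c.length, pvDisj (c.getD i []) (c.getD j []) := by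
  have key : ∀ coal : List Int,
      ((coal.foldl (fun m x => PySem.Set.union m ((pvOwners c).getD x PySem.Set.empty))
          PySem.Set.empty).length = c.length
        ↔ ∀ k < c.length, ∃ x ∈ coal, x ∈ c.getD k []) := by
    intro coal
    refine pvLenFull _ _ (fun k => ∃ x ∈ coal, x ∈ c.getD k [])
      (pvMatesNodup c coal PySem.Set.empty List.nodup_nil) (fun j => ?_)
    rw [pvMatesMem]
    simp only [PySem.Set.empty, List.not_mem_nil, false_or]
    constructor
    · rintro ⟨x, hx, h⟩
      obtain ⟨k, hk, rfl, hxk⟩ := (pvOwners_mem c x j).1 h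
      exact ⟨k, hk, rfl, x, hx, hxk⟩
    · rintro ⟨k, hk, rfl, x, hx, hxk⟩
      exact ⟨x, hx, (pvOwners_mem c x _).2 ⟨k, hk, rfl, hxk⟩⟩
  unfold hasDisjoint
  simp only [List.any_eq_true, decide_eq_true_eq]
  constructor
  · rintro ⟨coal, hcoal, hne⟩
    obtain ⟨i, hi, hieq⟩ := List.getElem_of_mem hcoal
    rw [← hieq, ← List.getD_eq_getElem c [] hi] at hne
    rw [Ne, key (c.getD i [])] at hne
    push Not at hne
    obtain ⟨j, hj, hdis⟩ := hne
    refine ⟨i, hi, j, hj, ?_⟩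
    intro x hx hxj
    exact hdis x hx hxj
  · rintro ⟨i, hi, j, hj, h⟩
    refine ⟨c.getD i [], by rw [List.getD_eq_getElem c [] hi]; exact List.getElem_mem hi, ?_⟩
    rw [Ne, key (c.getD i [])]
    intro hall
    obtain ⟨x, hx, hxj⟩ := hall j hj
    exact h x hx hxj

-- A's scan equals B's inverted-index test
theorem pvAScan_eq_hasDisjoint (c : List (List Int)) : pvAScan c = hasDisjoint c := by
  rw [Bool.eq_iff_iff, pvAScan_iff, pvHasDisjoint_iff]
  constructor
  · rintro ⟨i, hi, j, hij, hj, h⟩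
    exact ⟨i, hi, j, hj, h⟩
  · rintro ⟨i, hi, j, hj, h⟩
    rcases le_total i j with hle | hle
    · exact ⟨i, hi, j, hle, hj, h⟩
    · exact ⟨j, hj, i, hle, hi, (pvDisj_symm _ _).1 h⟩

-- ===== VERDICT (by name: the statement is the Claim_ definition above) =====
theorem check_complement_spec : Claim_equal_check_complement := by
  intro xs _
  unfold Spec_check_complement check_complement check_complement_alt

  have hinner : ∀ (collection : Nat) (acc : List Nat),
      (List.range (xs.getD collection []).length).foldl
        (fun acc index1 =>
          (List.range' index1 ((xs.getD collection []).length - index1)).foldl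
            (fun acc index2 =>
              if (PySem.Set.inter (PySem.Set.ofList ((xs.getD collection []).getD index1 []))
                  (PySem.Set.ofList ((xs.getD collection []).getD index2 []))).length = 0 then
                (if collection ∈ acc then acc else acc ++ [collection])
              else acc) acc) acc
        = if pvAScan (xs.getD collection []) = true ∧ collection ∉ acc
            then acc ++ [collection] else acc := by
    intro collection acc
    have hb : (fun (acc : List Nat) (index1 : Nat) =>
        (List.range' index1 ((xs.getD collection []).length - index1)).foldl
          (fun acc index2 =>
            if (PySem.Set.inter (PySem.Set.ofList ((xs.getD collection []).getD index1 []))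
                (PySem.Set.ofList ((xs.getD collection []).getD index2 []))).length = 0 then
              (if collection ∈ acc then acc else acc ++ [collection])
            else acc) acc)
        = fun (acc : List Nat) (index1 : Nat) =>
            if (∃ index2 ∈ List.range' index1 ((xs.getD collection []).length - index1),
                (PySem.Set.inter (PySem.Set.ofList ((xs.getD collection []).getD index1 []))
                  (PySem.Set.ofList ((xs.getD collection []).getD index2 []))).length = 0) then
              (if collection ∈ acc then acc else acc ++ [collection])
            else acc := by
      funext acc index1
      rw [pvFoldlMark, pvIfMark]
    rw [hb, pvFoldlMark]
    have : pvAScan (xs.getD collection [])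
        = decide (∃ i ∈ List.range (xs.getD collection []).length,
            ∃ j ∈ List.range' i ((xs.getD collection []).length - i),
            (PySem.Set.inter (PySem.Set.ofList ((xs.getD collection []).getD i []))
              (PySem.Set.ofList ((xs.getD collection []).getD j []))).length = 0) := by
      unfold pvAScan
      rw [Bool.eq_iff_iff]
      simp only [List.any_eq_true, decide_eq_true_eq]
    rw [this]
    simp only [decide_eq_true_eq]
  have hb2 : (fun (acc : List Nat) (collection : Nat) =>
      (List.range (xs.getD collection []).length).foldl
        (fun acc index1 =>
          (List.range' index1 ((xs.getD collection []).length - index1)).foldl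
            (fun acc index2 =>
              if (PySem.Set.inter (PySem.Set.ofList ((xs.getD collection []).getD index1 []))
                  (PySem.Set.ofList ((xs.getD collection []).getD index2 []))).length = 0 then
                (if collection ∈ acc then acc else acc ++ [collection])
              else acc) acc) acc)
      = fun (acc : List Nat) (collection : Nat) =>
          if pvAScan (xs.getD collection []) = true ∧ collection ∉ acc
            then acc ++ [collection] else acc := by
    funext acc collection
    exact hinner collection acc
  rw [hb2, pvMarkFoldl (fun col => pvAScan (xs.getD col []) = true) _ _ (by simp)
    List.nodup_range, List.nil_append]
  have hdec : (fun c => decide (pvAScan (xs.getD c []) = true))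
      = fun i => pvAScan (xs.getD i []) := by
    funext c
    simp
  rw [hdec]
  have hFpw : ((List.range xs.length).filter (fun i => pvAScan (xs.getD i []))).reverse.Pairwise
      (fun a b => b < a) := by
    rw [List.pairwise_reverse]
    exact List.Pairwise.filter _ List.pairwise_lt_range
  dsimp only
  rw [PySem.List.sorted_rev_eq_of_perm_of_pairwise_gt _ _ _ (List.reverse_perm _) hFpw]
  have := pvDelFilter (fun c => pvAScan c) [] xs
  rw [this]
  apply List.filter_congr
  intro x _
  rw [pvAScan_eq_hasDisjoint]
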